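-- pv_equiv track=rewrite | github.com/baranskixx/bit-algo-start-23-24 | Kolokwia/22-23/kol1a/2.py | ciong
-- ===== SOURCE A (Python) =====
-- def ciong(n):
--     first=1
--     sec=2
--     while first<n:
--         first,sec=sec,first+sec-1
--     if first==n:
--         return True
--     return False
-- ===== SOURCE B (Python) =====
-- def _isqrt(a):
--     # Newton's integer square root (floor).
--     if a <= 1:
--         return a
--     guess = a // 2
--     nxt = (guess + a // guess) // 2
--     while nxt < guess:
--         guess = nxt
--         nxt = (guess + a // guess) // 2
--     return guess
--
-- def _is_square(t):
--     return _isqrt(t) ** 2 == t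
--
-- def ciong(n):
--     # n is in A's sequence iff n-1 is a Fibonacci number (the recurrence is
--     # Fibonacci shifted by +1), tested in closed form via 5m^2 +/- 4 squares.
--     if n < 1:
--         return False
--     m = n - 1
--     a = 5 * m * m
--     return _is_square(a + 4) or (a >= 4 and _is_square(a - 4))
-- ===== Notes on version B (the rewrite author's own statement) =====
-- stated objective: alternative
-- what changed: Replaces A's iterative scan of the shifted-Fibonacci recurrence with a closed-form test: n is in the sequence iff n minus one is a Fibonacci number, checked by whether five times its square plus four or minus four is a perfect square (Newton integer sqrt).
import Mathlib
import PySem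

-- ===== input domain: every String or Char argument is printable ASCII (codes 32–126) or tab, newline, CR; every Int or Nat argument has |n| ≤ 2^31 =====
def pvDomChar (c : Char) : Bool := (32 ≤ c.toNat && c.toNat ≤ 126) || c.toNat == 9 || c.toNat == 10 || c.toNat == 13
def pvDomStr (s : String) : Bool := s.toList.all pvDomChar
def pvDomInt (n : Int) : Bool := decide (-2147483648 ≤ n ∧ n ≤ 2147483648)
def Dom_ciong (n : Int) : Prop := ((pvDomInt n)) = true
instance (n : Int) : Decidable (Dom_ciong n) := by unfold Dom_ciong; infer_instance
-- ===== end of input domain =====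

-- B replaces A's scan of the recurrence by a constant-time closed-form test: n is in the
-- sequence iff n minus one is a Fibonacci number, i.e. iff five times its square plus four
-- or minus four is a perfect square.

-- ===== PORT A =====
-- the while loop, with a fuel that is provably sufficient (first ≥ k after k steps)
def ciongLoop : Nat → Int → Int → Int → Int × Int
  | 0, _, first, sec => (first, sec)
  | fuel+1, n, first, sec =>
      if first < n then ciongLoop fuel n sec (first + sec - 1) else (first, sec)

def ciong (n : Int) : Bool :=
  ((ciongLoop (n.toNat + 2) n 1 2).1 == n)

-- ===== PORT B =====
-- Source B's _isqrt: `if a <= 1: return a`, then the Newton loop `nxt = (guess + a//guess)//2;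
-- while nxt < guess: ...` starting from guess = a//2.  That loop is verbatim the standard
-- library's iteration Nat.sqrt.iter (next := (guess + n/guess)/2, recurse while next < guess).
def pyIsqrt (a : Nat) : Nat :=
  if a ≤ 1 then a else Nat.sqrt.iter a (a / 2)

-- Source B's _is_square
def isPerfSq (t : Nat) : Bool := pyIsqrt t ^ 2 == t

def ciong_alt (n : Int) : Bool :=
  if n < 1 then false
  else
    let m := (n - 1).toNat
    let a := 5 * m * m
    isPerfSq (a + 4) || (decide (4 ≤ a) && isPerfSq (a - 4))

-- ===== PRECONDITION & SPEC =====
def Spec_ciong (n : Int) (out : Bool) : Prop := out = ciong_alt n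
instance (n : Int) (out : Bool) : Decidable (Spec_ciong n out) := by unfold Spec_ciong; infer_instance

-- ===== CLAIM (what is proved, stated in full; the proofs are below) =====
def Claim_equal_ciong : Prop := ∀ (n : Int), Dom_ciong n → Spec_ciong n (ciong n)

-- ===== LEMMAS AND PROOFS =====

-- The Lucas companion sequence of fib.
def lucas : Nat → Nat
  | 0 => 2
  | 1 => 1
  | n+2 => lucas n + lucas (n+1)

lemma lucas_add_fib : ∀ n : Nat, lucas n + Nat.fib n = 2 * Nat.fib (n+1) := by
  intro n
  induction n using Nat.twoStepInduction with
  | zero => decide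
  | one => decide
  | more n ih1 ih2 =>
      have h1 : Nat.fib (n+2) = Nat.fib n + Nat.fib (n+1) := Nat.fib_add_two
      have h2 : Nat.fib (n+1+2) = Nat.fib (n+1) + Nat.fib (n+1+1) := Nat.fib_add_two
      have e1 : Nat.fib (n+1+1) = Nat.fib (n+2) := rfl
      have e2 : Nat.fib (n+2+1) = Nat.fib (n+1+2) := rfl
      simp only [lucas]
      omega

-- L_n^2 = 5 F_n^2 + 4(-1)^n, proved together with the cross identity.
lemma lucas_sq_aux : ∀ n : Nat,
    ((lucas n : Int) * lucas n = 5 * ((Nat.fib n : Int) * Nat.fib n) + 4 * (-1)^n)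
    ∧ ((lucas (n+1) : Int) * lucas (n+1) = 5 * ((Nat.fib (n+1) : Int) * Nat.fib (n+1)) + 4 * (-1)^(n+1))
    ∧ ((lucas n : Int) * lucas (n+1) = 5 * ((Nat.fib n : Int) * Nat.fib (n+1)) + 2 * (-1)^n) := by
  intro n
  induction n with
  | zero => norm_num [lucas, Nat.fib]
  | succ n ih =>
      obtain ⟨hA, hA1, hB⟩ := ih
      refine ⟨hA1, ?_, ?_⟩
      · have hL : (lucas (n+2) : Int) = lucas n + lucas (n+1) := by
          simp [lucas]
        have hF : (Nat.fib (n+2) : Int) = Nat.fib n + Nat.fib (n+1) := by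
          rw [Nat.fib_add_two]; push_cast; ring
        rw [hL, hF]
        have hp1 : ((-1 : Int))^(n+1) = (-1)^n * (-1) := pow_succ _ _
        have hp2 : ((-1 : Int))^(n+2) = (-1)^n * (-1) * (-1) := by
          rw [pow_succ, pow_succ]
        rw [hp2]; rw [hp1] at hA1
        linear_combination hA + hA1 + 2 * hB
      · have hL : (lucas (n+2) : Int) = lucas n + lucas (n+1) := by
          simp [lucas]
        have hF : (Nat.fib (n+2) : Int) = Nat.fib n + Nat.fib (n+1) := by
          rw [Nat.fib_add_two]; push_cast; ring
        rw [hL, hF]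
        have hp1 : ((-1 : Int))^(n+1) = (-1)^n * (-1) := pow_succ _ _
        rw [hp1]; rw [hp1] at hA1
        linear_combination hB + hA1

lemma lucas_sq (n : Nat) :
    (lucas n : Int) * lucas n = 5 * ((Nat.fib n : Int) * Nat.fib n) + 4 * (-1)^n :=
  (lucas_sq_aux n).1

-- Vieta descent: every nonnegative solution of x^2 - 5y^2 = ±4 is a (Lucas, Fibonacci) pair.
lemma sol_fib : ∀ y : Nat, ∀ x : Nat,
    ((x : Int) * x = 5 * ((y : Int) * y) + 4 ∨ (x : Int) * x + 4 = 5 * ((y : Int) * y)) →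
    ∃ j, Nat.fib j = y ∧ lucas j = x := by
  intro y
  induction y using Nat.strong_induction_on with
  | _ y IH =>
    intro x h
    match y, IH with
    | 0, _ =>
      rcases h with h | h
      · have hx : x * x = 4 := by exact_mod_cast h
        have hx2 : x ≤ 2 := by nlinarith
        have : x = 2 := by interval_cases x <;> omega
        subst this
        exact ⟨0, by decide, by decide⟩
      · exfalso
        have hx0 : (0:Int) ≤ (x:Int) * x := by positivity
        simp at h; omega
    | 1, _ =>
      rcases h with h | h
      · have hx : x * x = 9 := by exact_mod_cast h
        have hx2 : x ≤ 3 := by nlinarith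
        have : x = 3 := by interval_cases x <;> omega
        subst this
        exact ⟨2, by decide, by decide⟩
      · have hx : x * x + 4 = 5 := by exact_mod_cast h
        have hx1 : x * x = 1 := by omega
        have hx2 : x ≤ 1 := by nlinarith
        have : x = 1 := by interval_cases x <;> omega
        subst this
        exact ⟨1, by decide, by decide⟩
    | (y'+2), IH =>
      set y := y' + 2 with hy
      have hY : (2 : Int) ≤ (y : Int) := by exact_mod_cast Nat.le_add_left 2 y'
      -- y < x
      have hyx : y < x := by
        have : (y : Int) < (x : Int) := by
          rcases h with h | h <;> nlinarith
        exact_mod_cast this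
      -- x and y have the same parity
      have hnat : x * x = 5 * (y * y) + 4 ∨ x * x + 4 = 5 * (y * y) := by
        rcases h with h | h
        · left; exact_mod_cast h
        · right; exact_mod_cast h
      have hpar : x % 2 = y % 2 := by
        have hxx : x * x % 2 = x % 2 := by
          conv_lhs => rw [Nat.mul_mod]
          rcases Nat.mod_two_eq_zero_or_one x with hx | hx <;> rw [hx]
        have hyy : y * y % 2 = y % 2 := by
          conv_lhs => rw [Nat.mul_mod]
          rcases Nat.mod_two_eq_zero_or_one y with hx | hx <;> rw [hx]
        rcases hnat with hn | hn
        · generalize hu : x * x = u at hn hxx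
          generalize hv : y * y = v at hn hyy
          omega
        · generalize hu : x * x = u at hn hxx
          generalize hv : y * y = v at hn hyy
          omega
      -- write x = y + 2d
      obtain ⟨d, hd⟩ : ∃ d, x = y + 2 * d := ⟨(x - y) / 2, by omega⟩
      have hdI : (x : Int) = (y : Int) + 2 * (d : Int) := by exact_mod_cast hd
      rcases h with h | h
      · -- case x^2 = 5y^2 + 4 : descend to e^2 + 4 = 5d^2
        have key4 : 4 * ((d:Int) * d) + 4 * ((y:Int) * d) = 4 * ((y:Int) * y) + 4 := by
          linear_combination h - ((x:Int) + y + 2 * d) * hdI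
        have hd1 : 1 ≤ d := by
          by_contra hc
          have : d = 0 := by omega
          subst this
          simp at key4
          nlinarith
        have hdy : d < y := by
          have : (d : Int) < (y : Int) := by nlinarith
          exact_mod_cast this
        have hd2y : d ≤ 2 * y := by omega
        obtain ⟨e, he⟩ : ∃ e : Nat, (e : Int) = 2 * (y : Int) - d :=
          ⟨2 * y - d, by push_cast [Nat.cast_sub hd2y]; ring⟩
        have hnew : (e : Int) * e + 4 = 5 * ((d : Int) * d) := by
          linear_combination ((e:Int) + 2 * y - d) * he - key4
        obtain ⟨j, hfj, hlj⟩ := IH d (by omega) e (Or.inr hnew)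
        have hed : e + d = 2 * y := by
          have : (e : Int) + d = 2 * y := by omega
          exact_mod_cast this
        have hfib : Nat.fib (j+1) = y := by
          have := lucas_add_fib j
          omega
        refine ⟨j+1, hfib, ?_⟩
        have h1 := lucas_add_fib (j+1)
        have h2 : Nat.fib (j+1+1) = Nat.fib j + Nat.fib (j+1) := Nat.fib_add_two
        omega
      · -- case x^2 + 4 = 5y^2 : descend to e^2 = 5d^2 + 4
        have key4 : 4 * ((d:Int) * d) + 4 * ((y:Int) * d) + 4 = 4 * ((y:Int) * y) := by
          linear_combination h - ((x:Int) + y + 2 * d) * hdI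
        have hd1 : 1 ≤ d := by
          by_contra hc
          have : d = 0 := by omega
          subst this
          simp at key4
          nlinarith
        have hdy : d < y := by
          have : (d : Int) < (y : Int) := by nlinarith
          exact_mod_cast this
        have hd2y : d ≤ 2 * y := by omega
        obtain ⟨e, he⟩ : ∃ e : Nat, (e : Int) = 2 * (y : Int) - d :=
          ⟨2 * y - d, by push_cast [Nat.cast_sub hd2y]; ring⟩
        have hnew : (e : Int) * e = 5 * ((d : Int) * d) + 4 := by
          linear_combination ((e:Int) + 2 * y - d) * he - key4
        obtain ⟨j, hfj, hlj⟩ := IH d (by omega) e (Or.inl hnew)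
        have hed : e + d = 2 * y := by
          have : (e : Int) + d = 2 * y := by omega
          exact_mod_cast this
        have hfib : Nat.fib (j+1) = y := by
          have := lucas_add_fib j
          omega
        refine ⟨j+1, hfib, ?_⟩
        have h1 := lucas_add_fib (j+1)
        have h2 : Nat.fib (j+1+1) = Nat.fib j + Nat.fib (j+1) := Nat.fib_add_two
        omega

-- fib grows at least linearly, so the fuel n.toNat + 2 always suffices.
lemma fib_lb : ∀ m : Nat, m + 1 ≤ Nat.fib (m+2) := by
  intro m
  induction m with
  | zero => decide
  | succ m ih =>
      have h1 : Nat.fib (m+1+2) = Nat.fib (m+1) + Nat.fib (m+1+1) := Nat.fib_add_two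
      have h2 : 0 < Nat.fib (m+1) := Nat.fib_pos.mpr (Nat.succ_pos m)
      have h3 : Nat.fib (m+1+1) = Nat.fib (m+2) := rfl
      omega

-- characterisation of A's loop: starting from (fib k + 1, fib (k+1) + 1), with enough fuel,
-- the final `first` equals n iff some fib j + 1 with j ≥ k equals n.
lemma loop_char : ∀ (fuel k : Nat) (n : Int), n ≤ (Nat.fib (k + fuel) : Int) + 1 →
    (((ciongLoop fuel n ((Nat.fib k : Int) + 1) ((Nat.fib (k+1) : Int) + 1)).1 = n)
      ↔ ∃ j, k ≤ j ∧ (Nat.fib j : Int) + 1 = n) := by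
  intro fuel
  induction fuel with
  | zero =>
      intro k n h
      rw [Nat.add_zero] at h
      simp only [ciongLoop]
      constructor
      · intro he; exact ⟨k, le_rfl, he⟩
      · rintro ⟨j, hj, he⟩
        have hm : (Nat.fib k : Int) ≤ (Nat.fib j : Int) := by exact_mod_cast Nat.fib_mono hj
        omega
  | succ fuel IH =>
      intro k n h
      simp only [ciongLoop]
      by_cases hc : (Nat.fib k : Int) + 1 < n
      · rw [if_pos hc]
        have harg : ((Nat.fib k : Int) + 1) + ((Nat.fib (k+1) : Int) + 1) - 1
            = (Nat.fib (k+2) : Int) + 1 := by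
          have : Nat.fib (k+2) = Nat.fib k + Nat.fib (k+1) := Nat.fib_add_two
          rw [this]; push_cast; ring
        rw [harg]
        have h' : n ≤ (Nat.fib (k + 1 + fuel) : Int) + 1 := by
          rw [show k + 1 + fuel = k + (fuel + 1) from by omega]; exact h
        rw [IH (k+1) n h']
        constructor
        · rintro ⟨j, hj, he⟩; exact ⟨j, by omega, he⟩
        · rintro ⟨j, hj, he⟩
          refine ⟨j, ?_, he⟩
          rcases Nat.eq_or_lt_of_le hj with rfl | hlt
          · omega
          · omega
      · rw [if_neg hc]
        constructor
        · intro he; exact ⟨k, le_rfl, he⟩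
        · rintro ⟨j, hj, he⟩
          have hm : (Nat.fib k : Int) ≤ (Nat.fib j : Int) := by exact_mod_cast Nat.fib_mono hj
          omega

lemma ciong_char (n : Int) : ciong n = true ↔ ∃ j, (Nat.fib j : Int) + 1 = n := by
  unfold ciong
  rw [beq_iff_eq]
  have hinit1 : (1 : Int) = (Nat.fib 0 : Int) + 1 := by decide
  have hinit2 : (2 : Int) = (Nat.fib 1 : Int) + 1 := by decide
  rw [hinit1, hinit2]
  have hfuel : n ≤ (Nat.fib (0 + (n.toNat + 2)) : Int) + 1 := by
    rw [Nat.zero_add]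
    by_cases hn : n ≤ 0
    · have : (0:Int) ≤ (Nat.fib (n.toNat + 2) : Int) := by positivity
      omega
    · replace hn : 0 < n := by omega
      have h1 : (n.toNat : Int) = n := Int.toNat_of_nonneg (by omega)
      have h2 : n.toNat + 1 ≤ Nat.fib (n.toNat + 2) := fib_lb n.toNat
      have h3 : ((n.toNat : Nat) : Int) + 1 ≤ (Nat.fib (n.toNat + 2) : Int) := by exact_mod_cast h2
      omega
  rw [loop_char (n.toNat + 2) 0 n hfuel]
  constructor
  · rintro ⟨j, _, he⟩; exact ⟨j, he⟩
  · rintro ⟨j, he⟩; exact ⟨j, Nat.zero_le j, he⟩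

-- pyIsqrt is a floor square root.
lemma pyIsqrt_spec (t : Nat) :
    pyIsqrt t * pyIsqrt t ≤ t ∧ t < (pyIsqrt t + 1) * (pyIsqrt t + 1) := by
  unfold pyIsqrt
  by_cases ht : t ≤ 1
  · rw [if_pos ht]
    interval_cases t <;> omega
  · rw [if_neg ht]
    replace ht : 2 ≤ t := by omega
    refine ⟨Nat.sqrt.iter_sq_le t (t/2), ?_⟩
    apply Nat.sqrt.lt_iter_succ_sq
    have h1 := Nat.div_add_mod t 2
    have h2 : t % 2 < 2 := Nat.mod_lt _ (by norm_num)
    have h3 : 1 ≤ t / 2 := by omega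
    nlinarith

lemma isPerfSq_iff (t : Nat) : isPerfSq t = true ↔ ∃ x, x * x = t := by
  unfold isPerfSq
  rw [beq_iff_eq, pow_two]
  obtain ⟨hle, hlt⟩ := pyIsqrt_spec t
  constructor
  · intro h; exact ⟨pyIsqrt t, h⟩
  · rintro ⟨x, hx⟩
    have h1 : pyIsqrt t ≤ x := by nlinarith
    have h2 : x ≤ pyIsqrt t := by nlinarith
    have : x = pyIsqrt t := by omega
    subst this; exact hx

lemma alt_char (n : Int) : ciong_alt n = true ↔ ∃ j, (Nat.fib j : Int) + 1 = n := by
  unfold ciong_alt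
  by_cases hn : n < 1
  · rw [if_pos hn]
    simp only [Bool.false_eq_true, false_iff]
    rintro ⟨j, hj⟩
    have : (0:Int) ≤ (Nat.fib j : Int) := by positivity
    omega
  · rw [if_neg hn]
    replace hn : 1 ≤ n := by omega
    set m := (n - 1).toNat with hmdef
    have hm : (m : Int) = n - 1 := Int.toNat_of_nonneg (by omega)
    simp only [Bool.or_eq_true, Bool.and_eq_true, decide_eq_true_eq, isPerfSq_iff,
      Nat.mul_assoc]
    constructor
    · rintro (⟨x, hx⟩ | ⟨h4, x, hx⟩)
      · have hxI : (x : Int) * x = 5 * ((m : Int) * m) + 4 := by exact_mod_cast hx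
        obtain ⟨j, hfj, _⟩ := sol_fib m x (Or.inl hxI)
        refine ⟨j, ?_⟩
        have : (Nat.fib j : Int) = (m : Int) := by exact_mod_cast hfj
        omega
      · have hxn : x * x + 4 = 5 * (m * m) := by
          generalize hu : m * m = u at hx h4
          generalize hv : x * x = v at hx ⊢
          omega
        have hxI : (x : Int) * x + 4 = 5 * ((m : Int) * m) := by exact_mod_cast hxn
        obtain ⟨j, hfj, _⟩ := sol_fib m x (Or.inr hxI)
        refine ⟨j, ?_⟩
        have : (Nat.fib j : Int) = (m : Int) := by exact_mod_cast hfj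
        omega
    · rintro ⟨j, hj⟩
      have hfm : Nat.fib j = m := by
        have : (Nat.fib j : Int) = (m : Int) := by omega
        exact_mod_cast this
      have hid := lucas_sq j
      rw [hfm] at hid
      rcases Nat.even_or_odd j with hev | hod
      · left
        rw [hev.neg_one_pow] at hid
        have : (lucas j : Int) * lucas j = 5 * ((m:Int) * m) + 4 := by linarith
        have hN : lucas j * lucas j = 5 * (m * m) + 4 := by exact_mod_cast this
        exact ⟨lucas j, hN⟩
      · right
        rw [hod.neg_one_pow] at hid
        have hI : (lucas j : Int) * lucas j + 4 = 5 * ((m:Int) * m) := by linarith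
        have hN : lucas j * lucas j + 4 = 5 * (m * m) := by exact_mod_cast hI
        generalize hu : m * m = u at hN ⊢
        generalize hv : lucas j * lucas j = v at hN ⊢
        exact ⟨by omega, ⟨lucas j, by rw [hv]; omega⟩⟩

-- ===== VERDICT (by name: the statement is the Claim_ definition above) =====
theorem ciong_spec : Claim_equal_ciong := by
  intro n _
  unfold Spec_ciong
  rw [Bool.eq_iff_iff, ciong_char, alt_char]
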